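-- pv_equiv track=rewrite | github.com/kedder/openvario-shell | src/ovshell/main.py | debounce_esc
-- ===== SOURCE A (Python) =====
-- def debounce_esc(keys, raw):
--     # For some weird reason, SteFly remote stick sends two "Escape" key presses
--     # when user presses X button once. Whatever reason might be, this is a
--     # permanent deision and we have to deal with that. We still want to handle
--     # single escape keypresses though, to support input devices that behave
--     # sanely.
--     filtered = []
--     escpressed = False
--     for k in keys:
--         if k == "esc":
--             if escpressed:
--                 escpressed = False
--                 filtered.append(k)
--             else:
--                 escpressed = True
--         else:
--             if escpressed:
--                 filtered.append("esc")
--                 escpressed = False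
--             filtered.append(k)
--     if escpressed:
--         filtered.append("esc")
--     return filtered
-- ===== SOURCE B (Python) =====
-- from itertools import groupby
--
--
-- def debounce_esc(keys, raw):
--     filtered = []
--     for key, grp in groupby(keys):
--         run = list(grp)
--         if key == "esc":
--             filtered.extend(["esc"] * ((len(run) + 1) // 2))
--         else:
--             filtered.extend(run)
--     return filtered
-- ===== Notes on version B (the rewrite author's own statement) =====
-- stated objective: alternative
-- what changed: Replaces the per-element toggling boolean with itertools.groupby: the input is split into maximal runs of equal consecutive keys, a run of n 'esc' keys contributes ceil(n/2) copies, any other run is emitted unchanged.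
import Mathlib
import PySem

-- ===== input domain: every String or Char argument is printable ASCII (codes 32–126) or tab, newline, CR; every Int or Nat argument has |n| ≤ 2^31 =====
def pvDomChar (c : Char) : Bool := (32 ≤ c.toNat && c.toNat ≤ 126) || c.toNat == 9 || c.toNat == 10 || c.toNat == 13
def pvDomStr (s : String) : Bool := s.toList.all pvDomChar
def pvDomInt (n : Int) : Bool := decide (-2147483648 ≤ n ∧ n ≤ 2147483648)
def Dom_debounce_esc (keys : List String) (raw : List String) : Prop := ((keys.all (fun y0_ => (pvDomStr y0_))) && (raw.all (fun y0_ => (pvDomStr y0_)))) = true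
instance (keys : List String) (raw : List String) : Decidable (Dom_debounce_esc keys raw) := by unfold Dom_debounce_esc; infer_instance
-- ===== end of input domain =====

-- B replaces A's per-element toggling boolean with a groupby-style pass over maximal
-- runs of equal consecutive keys (objective: alternative decomposition, same cost).

-- ===== PORT A =====
-- one loop iteration of A: state = (filtered, escpressed)
def pvStepA (s : List String × Bool) (k : String) : List String × Bool :=
  if k == "esc" then
    if s.2 then (s.1 ++ [k], false) else (s.1, true)
  else
    if s.2 then ((s.1 ++ ["esc"]) ++ [k], false) else (s.1 ++ [k], false)

def debounce_esc (keys : List String) (raw : List String) : List String :=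
  let st := keys.foldl pvStepA ([], false)
  if st.2 then st.1 ++ ["esc"] else st.1

-- ===== PORT B =====
-- transcription of the itertools.groupby pass: the next maximal run of equal keys is
-- takeWhile/dropWhile; an 'esc' run of length L contributes (L+1)/2 copies of 'esc'
def pvAltGo : List String → List String
  | [] => []
  | k :: rest =>
    if k == "esc" then
      List.replicate (((rest.takeWhile (· == "esc")).length + 2) / 2) "esc"
        ++ pvAltGo (rest.dropWhile (· == "esc"))
    else
      k :: pvAltGo rest
termination_by l => l.length
decreasing_by
  · have := List.length_dropWhile_le (· == "esc") rest
    simp only [List.length_cons]; omega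
  · simp

def debounce_esc_alt (keys : List String) (raw : List String) : List String :=
  pvAltGo keys

-- ===== PRECONDITION & SPEC =====
def Spec_debounce_esc (keys : List String) (raw : List String) (out : List String) : Prop := out = debounce_esc_alt keys raw
instance (keys : List String) (raw : List String) (out : List String) : Decidable (Spec_debounce_esc keys raw out) := by unfold Spec_debounce_esc; infer_instance

-- ===== CLAIM (what is proved, stated in full; the proofs are below) =====
def Claim_equal_debounce_esc : Prop := ∀ (keys : List String) (raw : List String), Dom_debounce_esc keys raw → Spec_debounce_esc keys raw (debounce_esc keys raw)

-- ===== LEMMAS AND PROOFS =====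

def pvFinish (s : List String × Bool) : List String :=
  if s.2 then s.1 ++ ["esc"] else s.1

theorem pvAltGo_cons_ne {k : String} (hk : k ≠ "esc") (t : List String) :
    pvAltGo (k :: t) = k :: pvAltGo t := by
  rw [pvAltGo]; simp [hk]

theorem pvAltGo_run (t : List String) :
    pvAltGo ("esc" :: t)
      = List.replicate (((t.takeWhile (· == "esc")).length + 2) / 2) "esc"
        ++ pvAltGo (t.dropWhile (· == "esc")) := by
  rw [pvAltGo]; simp

theorem pvAltGo_esc_cons_ne {k : String} (hk : k ≠ "esc") (t : List String) :
    pvAltGo ("esc" :: k :: t) = "esc" :: k :: pvAltGo t := by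
  have hb : (k == "esc") = false := by simp [hk]
  rw [pvAltGo_run]
  simp [List.takeWhile, List.dropWhile, hb, pvAltGo_cons_ne hk]

theorem pvAltGo_esc_esc (t : List String) :
    pvAltGo ("esc" :: "esc" :: t) = "esc" :: pvAltGo t := by
  have key : ∀ (m : Nat) (X : List String),
      List.replicate ((m + 2 + 2) / 2) "esc" ++ X
        = "esc" :: (List.replicate ((m + 2) / 2) "esc" ++ X) := by
    intro m X
    have h : (m + 2 + 2) / 2 = (m + 2) / 2 + 1 := by omega
    rw [h, List.replicate_succ]; simp
  match t with
  | [] => simp [pvAltGo]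
  | k :: t' =>
    by_cases hk : k = "esc"
    · subst hk
      rw [pvAltGo_run, pvAltGo_run]
      have htw : (("esc" :: "esc" :: t').takeWhile (· == "esc"))
          = "esc" :: "esc" :: (t'.takeWhile (· == "esc")) := by
        simp [List.takeWhile_cons_of_pos]
      have hdw : (("esc" :: "esc" :: t').dropWhile (· == "esc"))
          = t'.dropWhile (· == "esc") := by
        simp [List.dropWhile_cons_of_pos]
      rw [htw, hdw]
      simp only [List.length_cons]
      exact key _ _
    · have hb : (k == "esc") = false := by simp [hk]
      rw [pvAltGo_run]
      simp [List.takeWhile, List.dropWhile, hb, pvAltGo_cons_ne hk]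

theorem pvMain : ∀ (n : Nat) (keys : List String), keys.length ≤ n → ∀ (acc : List String),
    pvFinish (keys.foldl pvStepA (acc, false)) = acc ++ pvAltGo keys := by
  intro n
  induction n with
  | zero =>
    intro keys hlen acc
    have : keys = [] := List.eq_nil_of_length_eq_zero (Nat.le_zero.mp hlen)
    subst this
    simp [pvFinish, pvAltGo]
  | succ n ih =>
    intro keys hlen acc
    match keys with
    | [] => simp [pvFinish, pvAltGo]
    | k :: t =>
      by_cases hk : k = "esc"
      · subst hk
        match t with
        | [] => simp [pvStepA, pvFinish, pvAltGo]
        | k2 :: t2 =>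
          by_cases hk2 : k2 = "esc"
          · subst hk2
            have hstep : (("esc" :: "esc" :: t2).foldl pvStepA (acc, false))
                = t2.foldl pvStepA (acc ++ ["esc"], false) := by
              simp [List.foldl, pvStepA]
            rw [hstep, ih t2 (by simp at hlen ⊢; omega) (acc ++ ["esc"]),
              pvAltGo_esc_esc]
            simp
          · have hstep : (("esc" :: k2 :: t2).foldl pvStepA (acc, false))
                = t2.foldl pvStepA ((acc ++ ["esc"]) ++ [k2], false) := by
              simp [List.foldl, pvStepA, hk2]
            rw [hstep, ih t2 (by simp at hlen ⊢; omega) ((acc ++ ["esc"]) ++ [k2]),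
              pvAltGo_esc_cons_ne hk2]
            simp
      · have hstep : ((k :: t).foldl pvStepA (acc, false))
            = t.foldl pvStepA (acc ++ [k], false) := by
          simp [List.foldl, pvStepA, hk]
        rw [hstep, ih t (by simp at hlen ⊢; omega) (acc ++ [k]), pvAltGo_cons_ne hk]
        simp

-- ===== VERDICT (by name: the statement is the Claim_ definition above) =====
theorem debounce_esc_spec : Claim_equal_debounce_esc := by
  intro keys raw _
  unfold Spec_debounce_esc debounce_esc debounce_esc_alt
  have := pvMain keys.length keys (le_refl _) []
  simpa [pvFinish] using this
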